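-- pv_equiv track=rewrite | github.com/sdsunjay/interviews | 2023/array/trapping-rain-water/solution.py | get_end
-- ===== SOURCE A (Python) =====
-- def get_end(height):
--     end = len(height)-1
--     for index in reversed(range(0, len(height)-1)):
--         if height[index] < height[end]:
--             return end
--         else:
--             end -= 1
--     return end
-- ===== SOURCE B (Python) =====
-- def get_end(height):
--     result = -1 if not height else 0
--     for e in range(1, len(height)):
--         if height[e - 1] < height[e]:
--             result = e
--     return result
-- ===== Notes on version B (the rewrite author's own statement) =====
-- stated objective: alternative
-- what changed: Replaces A's backward early-exit scan with a decrementing end pointer by a forward full pass that keeps the last rise index in an accumulator.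
import Mathlib
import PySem

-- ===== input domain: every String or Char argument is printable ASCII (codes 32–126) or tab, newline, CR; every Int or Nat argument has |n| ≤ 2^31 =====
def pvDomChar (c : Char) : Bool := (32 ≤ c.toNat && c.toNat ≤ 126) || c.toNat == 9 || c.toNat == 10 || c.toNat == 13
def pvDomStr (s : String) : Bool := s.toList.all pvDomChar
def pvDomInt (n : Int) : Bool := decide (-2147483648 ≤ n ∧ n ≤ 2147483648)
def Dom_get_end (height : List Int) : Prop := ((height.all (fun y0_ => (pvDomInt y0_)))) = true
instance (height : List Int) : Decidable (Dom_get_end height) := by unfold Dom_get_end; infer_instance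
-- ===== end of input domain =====

-- B replaces A's backward early-exit scan by a forward full pass carrying the last rise index; same O(n) cost (objective: alternative).

-- ===== PORT A =====
-- the loop 'for index in reversed(range(0, len(height)-1)): …' with early return;
-- all indices reached by the loop are in range, so pyGetD's default 0 is never used
def getEndLoopA (height : List Int) : List Int → Int → Int
  | [], e => e
  | i :: rest, e =>
      if PySem.List.pyGetD height i 0 < PySem.List.pyGetD height e 0 then e
      else getEndLoopA height rest (e - 1)

def get_end (height : List Int) : Int :=
  getEndLoopA height ((PySem.List.pyRange 0 ((height.length : Int) - 1) 1).reverse)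
    ((height.length : Int) - 1)

-- ===== PORT B =====
-- forward pass 'for e in range(1, len(height)):' with an accumulator; indices e-1, e are in range
def get_end_alt (height : List Int) : Int :=
  (PySem.List.pyRange 1 (height.length : Int) 1).foldl
    (fun r e => if PySem.List.pyGetD height (e - 1) 0 < PySem.List.pyGetD height e 0 then e else r)
    (if height.isEmpty then -1 else 0)

-- ===== PRECONDITION & SPEC =====
def Spec_get_end (height : List Int) (out : Int) : Prop := out = get_end_alt height
instance (height : List Int) (out : Int) : Decidable (Spec_get_end height out) := by unfold Spec_get_end; infer_instance

-- ===== CLAIM (what is proved, stated in full; the proofs are below) =====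
def Claim_equal_get_end : Prop := ∀ (height : List Int), Dom_get_end height → Spec_get_end height (get_end height)

-- ===== LEMMAS AND PROOFS =====

-- common reference value: the rightmost e ≤ k with height[e-1] < height[e], else 0
def pvR (h : List Int) : Nat → Int
  | 0 => 0
  | k + 1 =>
      if PySem.List.pyGetD h (k : Int) 0 < PySem.List.pyGetD h ((k : Int) + 1) 0 then (k : Int) + 1
      else pvR h k

-- the index list A traverses, spelled out: [k-1, …, 0]
def pvDesc : Nat → List Int
  | 0 => []
  | k + 1 => (k : Int) :: pvDesc k

theorem pvRev_eq_desc (k : Nat) :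
    (PySem.List.pyRange 0 (k : Int) 1).reverse = pvDesc k := by
  induction k with
  | zero => simp [PySem.List.pyRange_one_eq_nil, pvDesc]
  | succ k ih =>
      rw [show ((k + 1 : Nat) : Int) = (k : Int) + 1 by push_cast [List.length_cons]; omega,
        PySem.List.pyRange_one_succ_right (by positivity : (0:Int) ≤ (k:Int))]
      simp [pvDesc, ih]

theorem pvLoopA_eq (h : List Int) (k : Nat) :
    getEndLoopA h (pvDesc k) (k : Int) = pvR h k := by
  induction k with
  | zero => simp [pvDesc, getEndLoopA, pvR]
  | succ k ih =>
      rw [show ((k + 1 : Nat) : Int) = (k : Int) + 1 by push_cast [List.length_cons]; omega]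
      simp only [pvDesc, getEndLoopA, pvR, add_sub_cancel_right, ih]

theorem pvFoldB_eq (h : List Int) (k : Nat) :
    (PySem.List.pyRange 1 ((k : Int) + 1) 1).foldl
      (fun r e => if PySem.List.pyGetD h (e - 1) 0 < PySem.List.pyGetD h e 0 then e else r) 0
      = pvR h k := by
  induction k with
  | zero => simp [PySem.List.pyRange_one_eq_nil, pvR]
  | succ k ih =>
      rw [show ((k + 1 : Nat) : Int) + 1 = ((k : Int) + 1) + 1 by push_cast [List.length_cons]; omega,
        PySem.List.pyRange_one_succ_right (by omega : (1:Int) ≤ (k:Int)+1)]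
      simp only [List.foldl_append, List.foldl_cons, List.foldl_nil, ih, pvR,
        add_sub_cancel_right]

-- ===== VERDICT (by name: the statement is the Claim_ definition above) =====
theorem get_end_spec : Claim_equal_get_end := by
  intro height _
  unfold Spec_get_end get_end get_end_alt
  match height with
  | [] => decide
  | x :: xs =>
      have hlen : ((x :: xs).length : Int) - 1 = (xs.length : Int) := by
        push_cast [List.length_cons]; omega
      rw [hlen, pvRev_eq_desc, pvLoopA_eq]
      have : ((x :: xs).length : Int) = (xs.length : Int) + 1 := by push_cast [List.length_cons]; omega
      rw [this]
      simp only [List.isEmpty_cons, if_neg (by decide : ¬ (false = true))]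
      exact (pvFoldB_eq (x :: xs) xs.length).symm
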